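-- pv_equiv track=rewrite | github.com/juagargi/esdx-scion | esdx4ixps/reloader/topology.py | _find_lowest_free_value
-- ===== SOURCE A (Python) =====
-- from typing import Callable, Dict, List, NamedTuple, Union
--
-- def _find_lowest_free_value(values: List[int], min_value:int=1) -> int:
--     values = sorted(values)
--     ret = min_value
--     for id in values:
--         if ret < id:
--             break
--         ret = id + 1
--     return ret
-- ===== SOURCE B (Python) =====
-- def _find_lowest_free_value(values, min_value=1):
--     # The lowest free value is always either min_value itself or the
--     # successor of some existing value: take the smallest such candidate
--     # that is not already taken.
--     taken = set(values)
--     candidates = {min_value} | {v + 1 for v in values}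
--     return min(candidates - taken)
-- ===== Notes on version B (the rewrite author's own statement) =====
-- stated objective: alternative
-- what changed: Replaced the sort-then-scan with a candidate-set formulation: build set(values) and the candidate set {min_value} | {v+1 for v in values} and return the minimum untaken candidate, so no sorting is needed.
import Mathlib
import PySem

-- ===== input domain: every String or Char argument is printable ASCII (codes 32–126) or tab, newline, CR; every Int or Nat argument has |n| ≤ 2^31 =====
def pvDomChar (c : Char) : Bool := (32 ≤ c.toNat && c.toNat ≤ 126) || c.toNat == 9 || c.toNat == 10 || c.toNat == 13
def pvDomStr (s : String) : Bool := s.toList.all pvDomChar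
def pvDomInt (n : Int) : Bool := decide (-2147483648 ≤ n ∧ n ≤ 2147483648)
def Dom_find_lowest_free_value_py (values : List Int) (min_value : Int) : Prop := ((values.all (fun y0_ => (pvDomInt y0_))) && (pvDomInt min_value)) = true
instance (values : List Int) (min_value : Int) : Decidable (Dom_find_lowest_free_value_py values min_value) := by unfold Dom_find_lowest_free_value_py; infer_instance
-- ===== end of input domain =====

-- B is an alternative algorithm: instead of A's sort-then-scan, it takes the minimum untaken element of the candidate set {min_value} ∪ {v+1 : v ∈ values}.

-- ===== PORT A =====
-- the 'for id in values: if ret < id: break; ret = id + 1' loop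
def pyALoop : List Int → Int → Int
  | [], ret => ret
  | id :: rest, ret => if ret < id then ret else pyALoop rest (id + 1)

def find_lowest_free_value_py (values : List Int) (min_value : Int) : Int :=
  pyALoop (PySem.List.sorted values (fun x => x) false) min_value

-- ===== PORT B =====
def find_lowest_free_value_py_alt (values : List Int) (min_value : Int) : Int :=
  let taken : PySem.Set Int := PySem.Set.ofList values
  let candidates : PySem.Set Int :=
    PySem.Set.union (PySem.Set.ofList [min_value]) (PySem.Set.ofList (values.map (fun v => v + 1)))
  match PySem.List.min? (PySem.Set.diff candidates taken) (fun x => x) with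
  | some m => m
  | none => 0   -- unreachable: 'candidates - taken' is never empty, Python's min never raises here

-- ===== PRECONDITION & SPEC =====
def Spec_find_lowest_free_value_py (values : List Int) (min_value : Int) (out : Int) : Prop := out = find_lowest_free_value_py_alt values min_value
instance (values : List Int) (min_value : Int) (out : Int) : Decidable (Spec_find_lowest_free_value_py values min_value out) := by unfold Spec_find_lowest_free_value_py; infer_instance

-- ===== CLAIM (what is proved, stated in full; the proofs are below) =====
def Claim_equal_find_lowest_free_value_py : Prop := ∀ (values : List Int) (min_value : Int), Dom_find_lowest_free_value_py values min_value → Spec_find_lowest_free_value_py values min_value (find_lowest_free_value_py values min_value)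

-- ===== LEMMAS AND PROOFS =====

-- A's loop returns either its start value or the successor of a list element
theorem pv_aloop_cand :
    ∀ (L : List Int) (ret : Int), pyALoop L ret = ret ∨ ∃ x ∈ L, pyALoop L ret = x + 1 := by
  intro L
  induction L with
  | nil => intro ret; left; rfl
  | cons a t ih =>
    intro ret
    by_cases h : ret < a
    · left; simp [pyALoop, h]
    · rcases ih (a + 1) with h2 | ⟨x, hx, h2⟩
      · right; exact ⟨a, List.mem_cons_self, by simp [pyALoop, h, h2]⟩
      · right; exact ⟨x, List.mem_cons_of_mem a hx, by simp [pyALoop, h, h2]⟩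

-- A's loop over a sorted list: result is not a member, is ≥ the start (in disjunct form),
-- and every value from the relevant start up to the result is a member
theorem pv_aloop_spec :
    ∀ (L : List Int) (ret : Int), L.Pairwise (· ≤ ·) →
      (pyALoop L ret ∉ L) ∧
      (ret ≤ pyALoop L ret ∨ ∃ x ∈ L, x + 1 ≤ pyALoop L ret) ∧
      (∀ k : Int, (ret ≤ k ∨ ∃ x ∈ L, x ≤ k) → k < pyALoop L ret → k ∈ L) := by
  intro L
  induction L with
  | nil =>
    intro ret _
    refine ⟨by simp [pyALoop], Or.inl (by simp [pyALoop]), ?_⟩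
    intro k hk1 hk2
    simp [pyALoop] at hk2
    rcases hk1 with h | ⟨x, hx, _⟩
    · omega
    · simp at hx
  | cons a t ih =>
    intro ret hpw
    have hhead : ∀ x ∈ t, a ≤ x := by
      intro x hx; exact (List.pairwise_cons.mp hpw).1 x hx
    have hpwt : t.Pairwise (· ≤ ·) := (List.pairwise_cons.mp hpw).2
    by_cases hlt : ret < a
    · have heq : pyALoop (a :: t) ret = ret := by simp [pyALoop, hlt]
      rw [heq]
      refine ⟨?_, Or.inl (le_refl ret), ?_⟩
      · intro hmem
        rcases List.mem_cons.mp hmem with h | h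
        · omega
        · have := hhead ret h; omega
      · intro k hk1 hk2
        rcases hk1 with h | ⟨x, hx, hxk⟩
        · omega
        · rcases List.mem_cons.mp hx with h | h
          · omega
          · have := hhead x h; omega
    · have heq : pyALoop (a :: t) ret = pyALoop t (a + 1) := by simp [pyALoop, hlt]
      have hrec := ih (a + 1) hpwt
      rw [heq]
      have hlb : a + 1 ≤ pyALoop t (a + 1) := by
        rcases hrec.2.1 with h | ⟨x, hx, hxo⟩
        · exact h
        · have := hhead x hx; omega
      refine ⟨?_, Or.inr ⟨a, List.mem_cons_self, hlb⟩, ?_⟩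
      · intro hmem
        rcases List.mem_cons.mp hmem with h | h
        · omega
        · exact hrec.1 h
      · intro k hk1 hk2
        by_cases hka : k = a
        · exact hka ▸ List.mem_cons_self
        · refine List.mem_cons_of_mem a (hrec.2.2 k ?_ hk2)
          rcases hk1 with h | ⟨x, hx, hxk⟩
          · left; omega
          · rcases List.mem_cons.mp hx with h | h
            · left; omega
            · exact Or.inr ⟨x, h, hxk⟩

-- ===== VERDICT (by name: the statement is the Claim_ definition above) =====
theorem find_lowest_free_value_py_spec : Claim_equal_find_lowest_free_value_py := by
  intro values min_value _
  unfold Spec_find_lowest_free_value_py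
  unfold find_lowest_free_value_py find_lowest_free_value_py_alt
  set L := PySem.List.sorted values (fun x => x) false with hL
  have hmemL : ∀ x : Int, x ∈ L ↔ x ∈ values := fun x => PySem.List.mem_sorted values (fun y => y) false x
  have hpw : L.Pairwise (· ≤ ·) := by
    have := PySem.List.sorted_pairwise (xs := values) (key := fun x => x)
    simpa using this
  set r := pyALoop L min_value with hr
  have hA := pv_aloop_spec L min_value hpw
  have hrV : r ∉ values := fun h => hA.1 ((hmemL r).mpr h)
  have hrC : r = min_value ∨ ∃ x ∈ values, r = x + 1 := by
    rcases pv_aloop_cand L min_value with h | ⟨x, hx, h⟩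
    · exact Or.inl h
    · exact Or.inr ⟨x, (hmemL x).mp hx, h⟩
  set cand : PySem.Set Int :=
    PySem.Set.union (PySem.Set.ofList [min_value]) (PySem.Set.ofList (values.map (fun v => v + 1))) with hcand
  have hmemC : ∀ y : Int, y ∈ cand ↔ (y = min_value ∨ ∃ x ∈ values, y = x + 1) := by
    intro y
    rw [hcand, PySem.Set.mem_union]
    constructor
    · rintro (h | h)
      · left; simpa [PySem.Set.mem_ofList] using h
      · right
        rw [PySem.Set.mem_ofList, List.mem_map] at h
        rcases h with ⟨x, hx, hxy⟩
        exact ⟨x, hx, hxy.symm⟩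
    · rintro (h | ⟨x, hx, hxy⟩)
      · left; simpa [PySem.Set.mem_ofList] using h
      · right
        rw [PySem.Set.mem_ofList, List.mem_map]
        exact ⟨x, hx, hxy.symm⟩
  have hmemD : ∀ y : Int, y ∈ PySem.Set.diff cand (PySem.Set.ofList values) ↔ (y ∈ cand ∧ y ∉ values) := by
    intro y
    rw [PySem.Set.mem_diff, PySem.Set.mem_ofList]
  have hrD : r ∈ PySem.Set.diff cand (PySem.Set.ofList values) :=
    (hmemD r).mpr ⟨(hmemC r).mpr hrC, hrV⟩
  rcases hm : PySem.List.min? (PySem.Set.diff cand (PySem.Set.ofList values)) (fun x => x) with _ | m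
  · exfalso
    have : PySem.Set.diff cand (PySem.Set.ofList values) = [] :=
      (PySem.List.min?_eq_none_iff _ _).mp hm
    rw [this] at hrD
    simp at hrD
  · simp only [hm]
    have hmD := PySem.List.min?_mem (h := hm)
    have hmC : m ∈ cand ∧ m ∉ values := (hmemD m).mp hmD
    have hmr : m ≤ r := by
      have := PySem.List.min?_isMin (h := hm) r hrD
      simpa using this
    have hrm : r ≤ m := by
      by_contra hc
      have hc' : m < r := by omega
      have hstart : min_value ≤ m ∨ ∃ x ∈ L, x ≤ m := by
        rcases (hmemC m).mp hmC.1 with h | ⟨x, hx, hxm⟩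
        · left; omega
        · right; exact ⟨x, (hmemL x).mpr hx, by omega⟩
      have : m ∈ L := hA.2.2 m hstart hc'
      exact hmC.2 ((hmemL m).mp this)
    omega
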